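-- pv_equiv track=rewrite | github.com/NataliaBondarenko/Count-files | count_files/utils/file_handlers.py | group_ext_by_type
-- ===== SOURCE A (Python) =====
-- from typing import List, Tuple, Dict
--
-- def group_ext_by_type(data: List[Tuple[str, int]],
--                       ext_and_group: Dict[str, str]) -> Dict[str, List[Tuple[str, int]]]:
--     """Group file extensions by type.
--
--     Default ext_and_group:
--     archives, audio, audio/video, data, documents, executables, fonts, images,
--     Python related extensions, videos, and other files.
--     User-defined ext_and_group:
--     may be created from configuration file.
--     Initial storage: dict with items like {'documents': [], 'images': [], ...}
--     key - group name, value - empty list.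
--     'other': reserved key.
--     :param data: list with items like [('png', 8), ('txt', 25), ...]
--     :param ext_and_group: dict with items like {'png': 'image', 'txt': documents, ...}
--     :return: sorted dict with items like {'documents': [('txt', 25), ...], 'images': [('png', 8), ...], ...}
--     """
--     # storage: Dict[str, list]
--     # local scope important
--     storage = dict.fromkeys(sorted(set(ext_and_group.values())), [])
--     other = []
--     for (ext, freq) in data:
--         item_type = ext_and_group.get(ext.lower(), 'other')
--         if item_type == 'other':
--             other.append((ext, freq))
--         else:
--             if storage.get(item_type):
--                 storage[item_type].append((ext, freq))
--             else:
--                 storage[item_type] = [(ext, freq)]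
--     if other:
--         storage.update({'other': other})
--     return storage
-- ===== SOURCE B (Python) =====
-- def group_ext_by_type(data, ext_and_group):
--     """Group (ext, freq) pairs by file type: one filtering pass of `data`
--     per sorted group, with the 'other' bucket attached at the end when
--     non-empty (overwriting in place if 'other' is itself a group name)."""
--     groups = sorted(set(ext_and_group.values()))
--     result = {g: [pair for pair in data
--                   if ext_and_group.get(pair[0].lower(), 'other') == g]
--               for g in groups}
--     other = [pair for pair in data
--              if ext_and_group.get(pair[0].lower(), 'other') == 'other']
--     if other:
--         result['other'] = other
--     return result
-- ===== Notes on version B (the rewrite author's own statement) =====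
-- stated objective: alternative
-- what changed: Instead of routing every pair once through a mutable per-group storage, B filters `data` once per sorted group (a dict comprehension of per-category scans) and computes the 'other' bucket by a separate filter, attaching it only when non-empty.
import Mathlib
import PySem

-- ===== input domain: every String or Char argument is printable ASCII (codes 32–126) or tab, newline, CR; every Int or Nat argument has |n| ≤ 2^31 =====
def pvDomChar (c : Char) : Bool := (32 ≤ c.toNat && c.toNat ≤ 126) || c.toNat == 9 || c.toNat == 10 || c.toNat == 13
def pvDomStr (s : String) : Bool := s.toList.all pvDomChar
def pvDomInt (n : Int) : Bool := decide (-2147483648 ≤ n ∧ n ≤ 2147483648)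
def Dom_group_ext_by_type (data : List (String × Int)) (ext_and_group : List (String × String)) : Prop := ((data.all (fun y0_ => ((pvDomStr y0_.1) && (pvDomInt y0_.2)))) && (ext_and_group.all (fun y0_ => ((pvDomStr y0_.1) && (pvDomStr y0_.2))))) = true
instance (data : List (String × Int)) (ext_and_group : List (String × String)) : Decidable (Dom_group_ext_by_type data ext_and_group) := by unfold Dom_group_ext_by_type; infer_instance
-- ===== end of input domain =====

-- B replaces A's single mutating routing pass by one filter of `data` per sorted
-- group plus a separate 'other' filter (alternative decomposition, not faster).

-- ===== PORT A =====
-- loop body of A's `for (ext, freq) in data` (state = (storage, other))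
def pvStepA (key : String × Int → String)
    (acc : PySem.Dict String (List (String × Int)) × List (String × Int))
    (p : String × Int) :
    PySem.Dict String (List (String × Int)) × List (String × Int) :=
  let itemType := key p
  if itemType == "other" then (acc.1, acc.2 ++ [p])
  else
    match PySem.Dict.get? acc.1 itemType with
    | some (q :: l) => (acc.1.insert itemType ((q :: l) ++ [p]), acc.2)   -- truthy: non-empty list
    | _ => (acc.1.insert itemType [p], acc.2)                             -- falsy: missing key or []

def group_ext_by_type (data : List (String × Int)) (ext_and_group : List (String × String)) : List (String × List (String × Int)) :=
  let d := PySem.Dict.ofList ext_and_group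
  -- storage = dict.fromkeys(sorted(set(ext_and_group.values())), [])
  let storage0 : PySem.Dict String (List (String × Int)) :=
    (PySem.List.sorted (PySem.Set.ofList d.values) (fun x => x) false).foldl
      (fun st g => st.insert g []) PySem.Dict.empty
  let res := data.foldl (pvStepA (fun p => d.getD (PySem.Str.lower p.1) "other")) (storage0, [])
  (if res.2.isEmpty then res.1 else res.1.insert "other" res.2).items

-- ===== PORT B =====
def group_ext_by_type_alt (data : List (String × Int)) (ext_and_group : List (String × String)) : List (String × List (String × Int)) :=
  let d := PySem.Dict.ofList ext_and_group
  let groups := PySem.List.sorted (PySem.Set.ofList d.values) (fun x => x) false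
  -- {g: [pair for pair in data if ext_and_group.get(pair[0].lower(), 'other') == g] for g in groups}
  let result := groups.foldl
    (fun r g => r.insert g (data.filter (fun p => d.getD (PySem.Str.lower p.1) "other" == g)))
    PySem.Dict.empty
  let other := data.filter (fun p => d.getD (PySem.Str.lower p.1) "other" == "other")
  (if other.isEmpty then result else result.insert "other" other).items

-- ===== PRECONDITION & SPEC =====
def Spec_group_ext_by_type (data : List (String × Int)) (ext_and_group : List (String × String)) (out : List (String × List (String × Int))) : Prop := out = group_ext_by_type_alt data ext_and_group
instance (data : List (String × Int)) (ext_and_group : List (String × String)) (out : List (String × List (String × Int))) : Decidable (Spec_group_ext_by_type data ext_and_group out) := by unfold Spec_group_ext_by_type; infer_instance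

-- ===== CLAIM (what is proved, stated in full; the proofs are below) =====
def Claim_equal_group_ext_by_type : Prop := ∀ (data : List (String × Int)) (ext_and_group : List (String × String)), Dom_group_ext_by_type data ext_and_group → Spec_group_ext_by_type data ext_and_group (group_ext_by_type data ext_and_group)

-- ===== LEMMAS AND PROOFS =====

-- a fold of fresh distinct inserts from the empty dict has exactly these items
lemma pv_items_init (groups : List String) (nd : groups.Nodup)
    (v : String → List (String × Int)) :
    (groups.foldl (fun st g => st.insert g (v g))
        (PySem.Dict.empty : PySem.Dict String (List (String × Int)))).items
      = groups.map (fun g => (g, v g)) := by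
  have h := PySem.Dict.items_foldl_insert_fresh (l := groups) (k := fun g => g) (v := v)
    (d := (PySem.Dict.empty : PySem.Dict String (List (String × Int))))
    (by intro a _; simp) (by simpa using nd)
  simpa using h

-- invariant of A's loop: for each group g ≠ "other" the storage entry is the
-- filter of the processed prefix, the "other" entry (when "other" is a group
-- name) stays [], and `other` is the "other"-filter of the prefix.
lemma pv_loopA (key : String × Int → String) (groups : List String) (nd : groups.Nodup) :
    ∀ (rest pre : List (String × Int))
      (st : PySem.Dict String (List (String × Int))) (oth : List (String × Int)),
      (∀ p ∈ rest, key p ≠ "other" → key p ∈ groups) →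
      st.items = groups.map (fun g => (g, if g = "other" then [] else pre.filter (fun p => key p == g))) →
      oth = pre.filter (fun p => key p == "other") →
      ((rest.foldl (pvStepA key) (st, oth)).1.items
          = groups.map (fun g => (g, if g = "other" then [] else (pre ++ rest).filter (fun p => key p == g))))
        ∧ (rest.foldl (pvStepA key) (st, oth)).2 = (pre ++ rest).filter (fun p => key p == "other") := by
  intro rest
  induction rest with
  | nil =>
    intro pre st oth _ hst hoth
    simpa using ⟨hst, hoth⟩
  | cons p rest ih =>
    intro pre st oth hmem hst hoth
    have hmem' : ∀ q ∈ rest, key q ≠ "other" → key q ∈ groups := fun q hq => hmem q (by simp [hq])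
    by_cases hko : key p = "other"
    · have hstep : pvStepA key (st, oth) p = (st, oth ++ [p]) := by
        simp [pvStepA, hko]
      have hst' : st.items = groups.map (fun g => (g, if g = "other" then [] else (pre ++ [p]).filter (fun q => key q == g))) := by
        rw [hst]
        refine List.map_congr_left ?_
        intro g _
        by_cases hgo : g = "other"
        · simp [hgo]
        · have : (key p == g) = false := by
            simp [hko]; exact fun h => hgo h.symm
          simp [hgo, List.filter_append, this]
      have hoth' : oth ++ [p] = (pre ++ [p]).filter (fun q => key q == "other") := by
        rw [hoth]
        simp [List.filter_append, hko]
      have h := ih (pre ++ [p]) st (oth ++ [p]) hmem' hst' hoth'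
      rw [List.foldl_cons, hstep]
      simpa [List.append_assoc] using h
    · have hkg : key p ∈ groups := hmem p (by simp) hko
      have hkeys : st.keys = groups := by
        simp [PySem.Dict.keys, hst, List.map_map, Function.comp_def]
      have hmemit : (key p, pre.filter (fun q => key q == key p)) ∈ st.items := by
        rw [hst]
        refine List.mem_map.mpr ⟨key p, hkg, ?_⟩
        simp [hko]
      have hget : st.get? (key p) = some (pre.filter (fun q => key q == key p)) :=
        PySem.Dict.get?_of_mem_items st hmemit (by rw [hkeys]; exact nd)
      have hstep : pvStepA key (st, oth) p
          = (st.insert (key p) ((pre.filter (fun q => key q == key p)) ++ [p]), oth) := by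
        cases hc : pre.filter (fun q => key q == key p) with
        | nil => simp [pvStepA, hko, hget, hc]
        | cons q l => simp [pvStepA, hko, hget, hc]
      have hcont : st.contains (key p) = true := by
        simp [PySem.Dict.contains_eq_decide_mem_keys, hkeys, hkg]
      have hins : (st.insert (key p) ((pre.filter (fun q => key q == key p)) ++ [p])).items
          = groups.map (fun g => (g, if g = "other" then [] else (pre ++ [p]).filter (fun q => key q == g))) := by
        rw [PySem.Dict.items_insert_of_contains _ _ hcont, hst, List.map_map]
        refine List.map_congr_left ?_
        intro g _
        by_cases hgk : g = key p
        · subst hgk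
          simp [hko, List.filter_append]
        · have h1 : (g == key p) = false := by simp [hgk]
          have h2 : (key p == g) = false := by
            simp; exact fun h => hgk h.symm
          by_cases hgo : g = "other"
          · subst hgo
            simp [Function.comp, hgk]
          · simp [Function.comp, h1, hgo, List.filter_append, h2]
      have hoth' : oth = (pre ++ [p]).filter (fun q => key q == "other") := by
        rw [hoth]
        simp [List.filter_append, hko]
      have h := ih (pre ++ [p]) _ oth hmem' hins hoth'
      rw [List.foldl_cons, hstep]
      simpa [List.append_assoc] using h

-- the whole computation, with the lookup abstracted as `key`
lemma pv_main (key : String × Int → String) (groups : List String) (nd : groups.Nodup)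
    (data : List (String × Int))
    (hmem : ∀ p ∈ data, key p ≠ "other" → key p ∈ groups) :
    (if (data.foldl (pvStepA key)
          (groups.foldl (fun st g => st.insert g []) PySem.Dict.empty, ([] : List (String × Int)))).2.isEmpty
      then (data.foldl (pvStepA key)
          (groups.foldl (fun st g => st.insert g []) PySem.Dict.empty, ([] : List (String × Int)))).1
      else (data.foldl (pvStepA key)
          (groups.foldl (fun st g => st.insert g []) PySem.Dict.empty, ([] : List (String × Int)))).1.insert "other"
            (data.foldl (pvStepA key)
          (groups.foldl (fun st g => st.insert g []) PySem.Dict.empty, ([] : List (String × Int)))).2).items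
    =
    (if (data.filter (fun p => key p == "other")).isEmpty
      then groups.foldl (fun r g => r.insert g (data.filter (fun p => key p == g))) PySem.Dict.empty
      else (groups.foldl (fun r g => r.insert g (data.filter (fun p => key p == g))) PySem.Dict.empty).insert "other"
            (data.filter (fun p => key p == "other"))).items := by
  have hinit : (groups.foldl (fun st g => st.insert g []) (PySem.Dict.empty : PySem.Dict String (List (String × Int)))).items
      = groups.map (fun g => (g, if g = "other" then [] else ([] : List (String × Int)).filter (fun p => key p == g))) := by
    rw [pv_items_init groups nd (fun _ => [])]
    refine List.map_congr_left ?_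
    intro g _
    by_cases hgo : g = "other" <;> simp [hgo]
  have hloop := pv_loopA key groups nd data []
    (groups.foldl (fun st g => st.insert g []) PySem.Dict.empty) [] hmem hinit (by simp)
  have hB : (groups.foldl (fun r g => r.insert g (data.filter (fun p => key p == g))) PySem.Dict.empty).items
      = groups.map (fun g => (g, data.filter (fun p => key p == g))) :=
    pv_items_init groups nd _
  have hAit := hloop.1
  have hAoth := hloop.2
  simp only [List.nil_append] at hAit hAoth
  by_cases hemp : (data.filter (fun p => key p == "other")).isEmpty
  · rw [if_pos (by rw [hAoth]; exact hemp), if_pos hemp, hAit, hB]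
    refine List.map_congr_left ?_
    intro g _
    by_cases hgo : g = "other"
    · subst hgo
      simp [List.isEmpty_iff.mp hemp]
    · simp [hgo]
  · rw [if_neg (by rw [hAoth]; exact hemp), if_neg hemp, hAoth]
    -- both sides insert "other" (data.filter …) into dicts with keys = groups
    have hkA : (data.foldl (pvStepA key)
        (groups.foldl (fun st g => st.insert g []) PySem.Dict.empty, ([] : List (String × Int)))).1.keys = groups := by
      simp [PySem.Dict.keys, hAit, List.map_map, Function.comp_def]
    have hkB : (groups.foldl (fun r g => r.insert g (data.filter (fun p => key p == g))) PySem.Dict.empty).keys = groups := by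
      simp [PySem.Dict.keys, hB, List.map_map, Function.comp_def]
    by_cases hog : "other" ∈ groups
    · have hcA : (data.foldl (pvStepA key)
          (groups.foldl (fun st g => st.insert g []) PySem.Dict.empty, ([] : List (String × Int)))).1.contains "other" = true := by
        simp [PySem.Dict.contains_eq_decide_mem_keys, hkA, hog]
      have hcB : (groups.foldl (fun r g => r.insert g (data.filter (fun p => key p == g))) PySem.Dict.empty).contains "other" = true := by
        simp [PySem.Dict.contains_eq_decide_mem_keys, hkB, hog]
      rw [PySem.Dict.items_insert_of_contains _ _ hcA, PySem.Dict.items_insert_of_contains _ _ hcB,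
        hAit, hB, List.map_map, List.map_map]
      refine List.map_congr_left ?_
      intro g _
      by_cases hgo : g = "other"
      · simp [Function.comp, hgo]
      · have h1 : (g == "other") = false := by simp [hgo]
        simp [Function.comp, h1, hgo]
    · have hcA : (data.foldl (pvStepA key)
          (groups.foldl (fun st g => st.insert g []) PySem.Dict.empty, ([] : List (String × Int)))).1.contains "other" = false := by
        simp [PySem.Dict.contains_eq_decide_mem_keys, hkA, hog]
      have hcB : (groups.foldl (fun r g => r.insert g (data.filter (fun p => key p == g))) PySem.Dict.empty).contains "other" = false := by
        simp [PySem.Dict.contains_eq_decide_mem_keys, hkB, hog]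
      rw [PySem.Dict.items_insert_of_not_contains _ _ hcA, PySem.Dict.items_insert_of_not_contains _ _ hcB,
        hAit, hB]
      congr 1
      refine List.map_congr_left ?_
      intro g hg
      have hgo : g ≠ "other" := fun h => hog (h ▸ hg)
      simp [hgo]

-- ===== VERDICT (by name: the statement is the Claim_ definition above) =====
theorem group_ext_by_type_spec : Claim_equal_group_ext_by_type := by
  intro data eg _
  show group_ext_by_type data eg = group_ext_by_type_alt data eg
  have nd : (PySem.List.sorted (PySem.Set.ofList (PySem.Dict.ofList eg).values) (fun x => x) false).Nodup :=
    ((PySem.List.sorted_perm _ _ _).symm.nodup) (PySem.Set.nodup_ofList _)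
  have hmem : ∀ p ∈ data, ((PySem.Dict.ofList eg).getD (PySem.Str.lower p.1) "other") ≠ "other" →
      ((PySem.Dict.ofList eg).getD (PySem.Str.lower p.1) "other")
        ∈ PySem.List.sorted (PySem.Set.ofList (PySem.Dict.ofList eg).values) (fun x => x) false := by
    intro p _ hne
    rw [PySem.List.mem_sorted, PySem.Set.mem_ofList]
    rcases h : (PySem.Dict.ofList eg).get? (PySem.Str.lower p.1) with _ | v
    · exact absurd (by rw [PySem.Dict.getD_eq_get?_getD, h]; rfl) hne
    · have hv : ((PySem.Dict.ofList eg).getD (PySem.Str.lower p.1) "other") = v := by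
        rw [PySem.Dict.getD_eq_get?_getD, h]; rfl
      rw [hv]
      have := PySem.Dict.mem_items_of_get?_eq_some _ h
      exact List.mem_map.mpr ⟨_, this, rfl⟩
  exact pv_main (fun p => (PySem.Dict.ofList eg).getD (PySem.Str.lower p.1) "other") _ nd data hmem
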